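-- pv_equiv track=rewrite | github.com/nolte/kamerplanter | src/backend/app/domain/services/calendar_service.py | _split_months
-- ===== SOURCE A (Python) =====
-- def _split_months(months: list[int]) -> list[tuple[int, int]]:
--     """Split a list of months into contiguous period tuples.
--
--     Example: [3, 4, 5, 6, 9, 10] → [(3, 6), (9, 10)]
--     """
--     if not months:
--         return []
--
--     sorted_months = sorted(set(months))
--     periods: list[tuple[int, int]] = []
--     start = sorted_months[0]
--     prev = sorted_months[0]
--     for m in sorted_months[1:]:
--         if m == prev + 1:
--             prev = m
--         else:
--             periods.append((start, prev))
--             start = m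
--             prev = m
--     periods.append((start, prev))
--     return periods
-- ===== SOURCE B (Python) =====
-- def _split_months(months):
--     s = set(months)
--     starts = sorted(m for m in s if m - 1 not in s)
--     ends = sorted(m for m in s if m + 1 not in s)
--     return list(zip(starts, ends))
-- ===== Notes on version B (the rewrite author's own statement) =====
-- stated objective: alternative
-- what changed: Instead of a stateful start/prev scan over the sorted list, B characterizes run boundaries by set membership: run starts are members m with m-1 not in the set, run ends are members with m+1 not in the set; sorting each boundary list and zipping them yields the periods.
import Mathlib
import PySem

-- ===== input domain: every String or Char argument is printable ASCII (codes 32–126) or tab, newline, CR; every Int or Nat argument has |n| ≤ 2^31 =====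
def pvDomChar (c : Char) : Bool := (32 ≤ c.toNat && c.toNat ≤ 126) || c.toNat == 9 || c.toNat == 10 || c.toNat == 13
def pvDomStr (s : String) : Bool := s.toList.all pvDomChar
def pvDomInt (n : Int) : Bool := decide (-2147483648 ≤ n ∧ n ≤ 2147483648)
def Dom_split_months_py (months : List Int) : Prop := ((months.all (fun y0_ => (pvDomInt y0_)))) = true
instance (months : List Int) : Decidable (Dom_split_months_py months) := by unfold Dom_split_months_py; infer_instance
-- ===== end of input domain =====

-- B replaces A's stateful start/prev scan by a boundary characterization: run starts are
-- set members m with m-1 not in the set, run ends those with m+1 not in the set; zip them.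
-- ===== PORT A =====
-- A's for-loop over sorted_months[1:] carrying (start, prev, periods)
def pvLoopA (rest : List Int) (start prev : Int) (acc : List (Int × Int)) : List (Int × Int) :=
  match rest with
  | [] => acc ++ [(start, prev)]
  | m :: rs =>
    if m = prev + 1 then pvLoopA rs start m acc
    else pvLoopA rs m m (acc ++ [(start, prev)])

def split_months_py (months : List Int) : List (Int × Int) :=
  if months = [] then []
  else
    let sorted_months := PySem.List.sorted (PySem.Set.ofList months) (fun x => x) false
    match sorted_months with
    | [] => []  -- unreachable: months ≠ [] so sorted(set(months)) ≠ []
    | s0 :: tail => pvLoopA tail s0 s0 []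

-- ===== PORT B =====
def split_months_py_alt (months : List Int) : List (Int × Int) :=
  let s := PySem.Set.ofList months
  let starts := PySem.List.sorted (s.filter (fun m => !(PySem.Set.contains s (m - 1)))) (fun x => x) false
  let ends := PySem.List.sorted (s.filter (fun m => !(PySem.Set.contains s (m + 1)))) (fun x => x) false
  starts.zip ends

-- ===== PRECONDITION & SPEC =====
def Spec_split_months_py (months : List Int) (out : List (Int × Int)) : Prop := out = split_months_py_alt months
instance (months : List Int) (out : List (Int × Int)) : Decidable (Spec_split_months_py months out) := by unfold Spec_split_months_py; infer_instance

-- ===== CLAIM (what is proved, stated in full; the proofs are below) =====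
def Claim_equal_split_months_py : Prop := ∀ (months : List Int), Dom_split_months_py months → Spec_split_months_py months (split_months_py months)

-- ===== LEMMAS AND PROOFS =====

-- A's loop appends at the end of acc
theorem pvLoopA_acc (rest : List Int) (start prev : Int) (acc : List (Int × Int)) :
    pvLoopA rest start prev acc = acc ++ pvLoopA rest start prev [] := by
  induction rest generalizing start prev acc with
  | nil => simp [pvLoopA]
  | cons m rs ih =>
    by_cases h : m = prev + 1
    · simp only [pvLoopA, if_pos h]; exact ih start m acc
    · simp only [pvLoopA, if_neg h]
      rw [ih m m (acc ++ [(start, prev)]), ih m m ([] ++ [(start, prev)])]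
      simp

-- filter over a ∉-condition ignores a cons'd head the mapped values never hit
theorem pvFilterDropHead (f : Int → Int) (a : Int) (t l : List Int)
    (h : ∀ y ∈ l, f y ≠ a) :
    l.filter (fun y => decide (f y ∉ (a :: t))) = l.filter (fun y => decide (f y ∉ t)) := by
  apply List.filter_congr
  intro y hy
  simp [List.mem_cons, h y hy]

-- Core invariant: on a strictly increasing remainder `rest` whose elements all exceed `prev`,
-- A's loop equals the zip of the boundary filters over prev :: rest.
theorem pvLoopA_eq_zip (rest : List Int) (start prev : Int)
    (hs : rest.Pairwise (· < ·)) (hlt : ∀ y ∈ rest, prev < y) :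
    pvLoopA rest start prev [] =
      List.zip (start :: rest.filter (fun m => decide ((m - 1) ∉ (prev :: rest))))
               ((prev :: rest).filter (fun m => decide ((m + 1) ∉ (prev :: rest)))) := by
  induction rest generalizing start prev with
  | nil => simp [pvLoopA]
  | cons m rs ih =>
    have hm : prev < m := hlt m (List.mem_cons_self)
    have hrs : ∀ y ∈ rs, m < y := fun y hy => (List.pairwise_cons.mp hs).1 y hy
    have hs' : rs.Pairwise (· < ·) := (List.pairwise_cons.mp hs).2
    by_cases h : m = prev + 1
    · -- continue the run
      have e1 : (m :: rs).filter (fun y => decide ((y - 1) ∉ (prev :: m :: rs)))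
              = rs.filter (fun y => decide ((y - 1) ∉ (m :: rs))) := by
        rw [List.filter_cons_of_neg (by
          simp only [decide_eq_true_eq, Decidable.not_not]
          exact List.mem_cons.mpr (Or.inl (by omega)))]
        exact pvFilterDropHead (fun y => y - 1) prev (m :: rs) rs
          (fun y hy => show y - 1 ≠ prev by have := hrs y hy; omega)
      have e2 : (prev :: m :: rs).filter (fun y => decide ((y + 1) ∉ (prev :: m :: rs)))
              = (m :: rs).filter (fun y => decide ((y + 1) ∉ (m :: rs))) := by
        rw [List.filter_cons_of_neg (by
          simp only [decide_eq_true_eq, Decidable.not_not]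
          exact List.mem_cons.mpr (Or.inr (List.mem_cons.mpr (Or.inl (by omega)))))]
        exact pvFilterDropHead (fun y => y + 1) prev (m :: rs) (m :: rs)
          (fun y hy => show y + 1 ≠ prev by
            rcases List.mem_cons.mp hy with h1 | h2
            · omega
            · have := hrs y h2; omega)
      simp only [pvLoopA, if_pos h]
      rw [ih start m hs' hrs, e1, e2]
    · -- close the run, start a new one
      have hps : prev + 1 < m := by omega
      have e1 : (m :: rs).filter (fun y => decide ((y - 1) ∉ (prev :: m :: rs)))
              = m :: rs.filter (fun y => decide ((y - 1) ∉ (m :: rs))) := by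
        rw [List.filter_cons_of_pos (by
          simp only [decide_eq_true_eq, List.mem_cons, not_or]
          refine ⟨by omega, by omega, fun hc => ?_⟩
          have := hrs _ hc; omega)]
        rw [pvFilterDropHead (fun y => y - 1) prev (m :: rs) rs
          (fun y hy => show y - 1 ≠ prev by have := hrs y hy; omega)]
      have e2 : (prev :: m :: rs).filter (fun y => decide ((y + 1) ∉ (prev :: m :: rs)))
              = prev :: (m :: rs).filter (fun y => decide ((y + 1) ∉ (m :: rs))) := by
        rw [List.filter_cons_of_pos (by
          simp only [decide_eq_true_eq, List.mem_cons, not_or]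
          refine ⟨by omega, by omega, fun hc => ?_⟩
          have := hrs _ hc; omega)]
        rw [pvFilterDropHead (fun y => y + 1) prev (m :: rs) (m :: rs)
          (fun y hy => show y + 1 ≠ prev by
            rcases List.mem_cons.mp hy with h1 | h2
            · omega
            · have := hrs y h2; omega)]
      simp only [pvLoopA, if_neg h]
      rw [pvLoopA_acc, ih m m hs' hrs, e1, e2, List.zip_cons_cons]
      rfl

-- sorted(filter p over the deduplicated set) = filter p (sorted set): both are the
-- strictly increasing enumeration of the filtered set.
theorem sorted_filter_comm (xs : List Int) (p : Int → Bool) :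
    PySem.List.sorted ((PySem.Set.ofList xs).filter p) (fun x => x) false
      = (PySem.List.sorted (PySem.Set.ofList xs) (fun x => x) false).filter p := by
  apply PySem.List.sorted_eq_of_perm_of_pairwise_lt
  · exact (PySem.List.sorted_perm _ _ _).filter p
  · exact List.Pairwise.filter p (PySem.List.sorted_ofList_pairwise_lt xs)

-- ===== VERDICT (by name: the statement is the Claim_ definition above) =====
theorem split_months_py_spec : Claim_equal_split_months_py := by
  intro months _
  unfold Spec_split_months_py split_months_py split_months_py_alt
  have hcontains : ∀ x : Int,
      (!(PySem.Set.contains (PySem.Set.ofList months) x) : Bool)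
        = decide (x ∉ PySem.List.sorted (PySem.Set.ofList months) (fun x => x) false) := by
    intro x
    by_cases hx : x ∈ PySem.Set.ofList months
    · have hx' : x ∈ months := by
        have := hx; rw [PySem.Set.mem_ofList] at this; exact this
      simp [(PySem.List.mem_sorted _ _ _ _).mpr hx, hx']
    · have hc : PySem.Set.contains (PySem.Set.ofList months) x = false := by
        cases hcc : PySem.Set.contains (PySem.Set.ofList months) x
        · rfl
        · exact absurd ((PySem.Set.contains_iff _ _).mp hcc) hx
      simp [hc]
  have hfilters : ∀ (q : Int → Int),
      PySem.List.sorted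
          ((PySem.Set.ofList months).filter (fun m => !(PySem.Set.contains (PySem.Set.ofList months) (q m))))
          (fun x => x) false
        = (PySem.List.sorted (PySem.Set.ofList months) (fun x => x) false).filter
            (fun m => decide ((q m) ∉ PySem.List.sorted (PySem.Set.ofList months) (fun x => x) false)) := by
    intro q
    rw [sorted_filter_comm]
    apply List.filter_congr
    intro y _
    exact hcontains (q y)
  by_cases h : months = []
  · subst h
    rfl
  · rw [if_neg h]
    simp only [hfilters]
    have hLpair : (PySem.List.sorted (PySem.Set.ofList months) (fun x => x) false).Pairwise (· < ·) :=
      PySem.List.sorted_ofList_pairwise_lt months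
    have hne : PySem.List.sorted (PySem.Set.ofList months) (fun x => x) false ≠ [] := by
      intro hs
      rw [PySem.List.sorted_eq_nil_iff] at hs
      cases months with
      | nil => exact h rfl
      | cons a t =>
        have ha : a ∈ PySem.Set.ofList (a :: t) := by
          rw [PySem.Set.mem_ofList]; exact List.mem_cons_self
        rw [hs] at ha
        exact absurd ha (List.not_mem_nil)
    match hm : PySem.List.sorted (PySem.Set.ofList months) (fun x => x) false with
    | [] => exact absurd hm hne
    | s0 :: tail =>
      have hpair := hm ▸ hLpair
      have hs' : tail.Pairwise (· < ·) := (List.pairwise_cons.mp hpair).2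
      have hlt : ∀ y ∈ tail, s0 < y := (List.pairwise_cons.mp hpair).1
      show pvLoopA tail s0 s0 [] = _
      rw [pvLoopA_eq_zip tail s0 s0 hs' hlt]
      congr 2
      rw [List.filter_cons_of_pos]
      simp only [decide_eq_true_eq, List.mem_cons, not_or]
      exact ⟨by omega, fun hc => by have := hlt _ hc; omega⟩
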